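-- pv_equiv track=rewrite | github.com/parsapournabi/advent-of-code-2024 | day 2/day.py | filter_map
-- ===== SOURCE A (Python) =====
-- def filter_map(value: list):
--     len_map = len(value)
--     if value != sorted(value) and value != sorted(value, reverse=True):
--         return None
--     for i in range(len_map):
--         if i >= (len_map - 1):
--             continue
--         if abs(value[i] - value[i + 1]) not in range(1, 4):
--             return None
--     return True
-- ===== SOURCE B (Python) =====
-- def filter_map(value: list):
--     # One linear pass over adjacent differences: strictly increasing with steps
--     # between 1 and 3, or strictly decreasing with steps between 1 and 3.
--     diffs = [b - a for a, b in zip(value, value[1:])]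
--     if all(1 <= d <= 3 for d in diffs) or all(-3 <= d <= -1 for d in diffs):
--         return True
--     return None
-- ===== Notes on version B (the rewrite author's own statement) =====
-- stated objective: faster
-- what changed: Replaces the two sorted() copies plus indexed range loop with a single linear pass over adjacent differences, checking they are either all between 1 and 3 or all between -3 and -1.
import Mathlib
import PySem

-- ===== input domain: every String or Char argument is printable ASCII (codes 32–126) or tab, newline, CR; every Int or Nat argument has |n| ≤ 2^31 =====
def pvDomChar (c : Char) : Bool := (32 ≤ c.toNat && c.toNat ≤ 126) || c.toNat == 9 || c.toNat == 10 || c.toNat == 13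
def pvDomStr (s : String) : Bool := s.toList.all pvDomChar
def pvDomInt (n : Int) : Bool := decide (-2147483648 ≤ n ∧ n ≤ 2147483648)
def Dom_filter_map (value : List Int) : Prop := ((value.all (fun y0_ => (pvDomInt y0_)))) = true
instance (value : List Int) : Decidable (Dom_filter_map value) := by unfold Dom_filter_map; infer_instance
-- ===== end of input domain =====

-- B replaces A's two sorted() copies and indexed range loop by one linear pass
-- over adjacent differences (objective: faster, O(n) instead of O(n log n)).

-- ===== PORT A =====
-- the 'for i in range(len_map)' loop with its 'continue' and early 'return None';
-- indices i and i+1 are always in range when read (i < len_map - 1), so pyGetD is exact here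
def filterMapLoop (value : List Int) (len_map : Int) : List Int → Option Bool
  | [] => some true
  | i :: rest =>
    if i ≥ len_map - 1 then filterMapLoop value len_map rest
    else
      if ¬ (1 ≤ |PySem.List.pyGetD value i 0 - PySem.List.pyGetD value (i + 1) 0| ∧
             |PySem.List.pyGetD value i 0 - PySem.List.pyGetD value (i + 1) 0| < 4) then none
      else filterMapLoop value len_map rest

def filter_map (value : List Int) : Option Bool :=
  let len_map : Int := value.length
  if value ≠ PySem.List.sorted value (fun x => x) false ∧
     value ≠ PySem.List.sorted value (fun x => x) true then none
  else filterMapLoop value len_map (PySem.List.pyRange 0 len_map 1)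

-- ===== PORT B =====
def filter_map_alt (value : List Int) : Option Bool :=
  let diffs := (value.zip (value.drop 1)).map (fun p => p.2 - p.1)
  if diffs.all (fun d => decide (1 ≤ d) && decide (d ≤ 3)) ||
     diffs.all (fun d => decide (-3 ≤ d) && decide (d ≤ -1)) then some true else none

-- ===== PRECONDITION & SPEC =====
def Spec_filter_map (value : List Int) (out : Option Bool) : Prop := out = filter_map_alt value
instance (value : List Int) (out : Option Bool) : Decidable (Spec_filter_map value out) := by unfold Spec_filter_map; infer_instance

-- ===== CLAIM (what is proved, stated in full; the proofs are below) =====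
def Claim_equal_filter_map : Prop := ∀ (value : List Int), Dom_filter_map value → Spec_filter_map value (filter_map value)

-- ===== LEMMAS AND PROOFS =====

-- canonical "adjacent pairs" form of a relation holding along the list
def Adj (R : Int → Int → Prop) (l : List Int) : Prop :=
  ∀ (k : Nat) (h : k + 1 < l.length), R (l[k]'(by omega)) (l[k+1]'h)

lemma pairwise_le_iff_adj (l : List Int) :
    l.Pairwise (· ≤ ·) ↔ Adj (· ≤ ·) l := by
  rw [← List.isChain_iff_pairwise, List.isChain_iff_getElem, Adj]

lemma pairwise_ge_iff_adj (l : List Int) :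
    l.Pairwise (fun a b => b ≤ a) ↔ Adj (fun a b => b ≤ a) l := by
  haveI : Trans (fun (a b : Int) => b ≤ a) (fun (a b : Int) => b ≤ a) (fun (a b : Int) => b ≤ a) :=
    { trans := fun h1 h2 => le_trans h2 h1 }
  rw [← List.isChain_iff_pairwise, List.isChain_iff_getElem, Adj]

lemma sorted_asc_iff (value : List Int) :
    value = PySem.List.sorted value (fun x => x) false ↔ Adj (· ≤ ·) value := by
  constructor
  · intro h
    rw [← pairwise_le_iff_adj]
    have := PySem.List.sorted_pairwise value (fun x => x)
    rw [← h] at this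
    exact this
  · intro h
    exact (PySem.List.sorted_eq_self_of_pairwise value (fun x => x)
      ((pairwise_le_iff_adj value).2 h)).symm

lemma sorted_desc_iff (value : List Int) :
    value = PySem.List.sorted value (fun x => x) true ↔ Adj (fun a b => b ≤ a) value := by
  constructor
  · intro h
    rw [← pairwise_ge_iff_adj]
    have := PySem.List.sorted_pairwise_rev value (fun x => x)
    rw [← h] at this
    exact this
  · intro h
    exact (PySem.List.sorted_rev_eq_self_of_pairwise value (fun x => x)
      ((pairwise_ge_iff_adj value).2 h)).symm

-- A's loop: characterization over the index list, plus "only none or some true"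
lemma loop_none_or_true (value : List Int) (n : Int) (idxs : List Int) :
    filterMapLoop value n idxs = some true ∨ filterMapLoop value n idxs = none := by
  induction idxs with
  | nil => left; rfl
  | cons i rest ih =>
    simp only [filterMapLoop]
    split_ifs with h1 h2
    · exact ih
    · exact ih
    · right; rfl

lemma loop_some_iff (value : List Int) (n : Int) (idxs : List Int) :
    filterMapLoop value n idxs = some true ↔
      ∀ i ∈ idxs, i < n - 1 →
        1 ≤ |PySem.List.pyGetD value i 0 - PySem.List.pyGetD value (i + 1) 0| ∧
        |PySem.List.pyGetD value i 0 - PySem.List.pyGetD value (i + 1) 0| < 4 := by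
  induction idxs with
  | nil => simp [filterMapLoop]
  | cons i rest ih =>
    simp only [filterMapLoop]
    split_ifs with h1 h2
    · rw [ih]
      constructor
      · intro h j hj hjn
        rcases List.mem_cons.1 hj with hj | hj
        · omega
        · exact h j hj hjn
      · intro h j hj hjn; exact h j (List.mem_cons_of_mem _ hj) hjn
    · rw [ih]
      constructor
      · intro h j hj hjn
        rcases List.mem_cons.1 hj with hj | hj
        · subst hj; exact h2
        · exact h j hj hjn
      · intro h j hj hjn; exact h j (List.mem_cons_of_mem _ hj) hjn
    · constructor
      · intro h; cases h
      · intro h; exact absurd (h i List.mem_cons_self (by omega)) h2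

lemma loop_range_iff (value : List Int) :
    filterMapLoop value (value.length : Int) (PySem.List.pyRange 0 (value.length : Int) 1) = some true ↔
      Adj (fun a b => 1 ≤ |a - b| ∧ |a - b| < 4) value := by
  rw [loop_some_iff]
  constructor
  · intro h k hk
    have h0 : (0 : Int) ≤ (k : Int) := by omega
    have hmem : (k : Int) ∈ PySem.List.pyRange 0 (value.length : Int) 1 := by
      rw [PySem.List.mem_pyRange_one]; omega
    have hx := h (k : Int) hmem (by omega)
    rw [PySem.List.pyGetD_eq_getElem value 0 h0 (by omega),
         PySem.List.pyGetD_eq_getElem value 0 (by omega) (by omega)] at hx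
    simpa [show ((k : Int)).toNat = k from by omega,
           show ((k : Int) + 1).toNat = k + 1 from by omega] using hx
  · intro h i hmem hin
    rw [PySem.List.mem_pyRange_one] at hmem
    obtain ⟨h0, _⟩ := hmem
    rw [PySem.List.pyGetD_eq_getElem value 0 h0 (by omega),
        PySem.List.pyGetD_eq_getElem value 0 (by omega) (by omega)]
    have hlt : i.toNat + 1 < value.length := by omega
    have hx := h i.toNat hlt
    simpa [show (i + 1).toNat = i.toNat + 1 from by omega] using hx

-- B: the two all-checks over the adjacent pairs
lemma forall_zip_iff_adj (value : List Int) (Q : Int → Prop) :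
    (∀ p ∈ value.zip (value.drop 1), Q (p.2 - p.1)) ↔
      Adj (fun a b => Q (b - a)) value := by
  constructor
  · intro h k hk
    have hzl : k < (value.zip (value.drop 1)).length := by
      simp [List.length_zip]; omega
    have hp := h ((value.zip (value.drop 1))[k]'hzl) (List.getElem_mem hzl)
    rw [List.getElem_zip, List.getElem_drop] at hp
    simpa [show 1 + k = k + 1 by omega] using hp
  · intro h p hp
    rw [List.mem_iff_getElem] at hp
    obtain ⟨k, hk, hpk⟩ := hp
    have hk' : k + 1 < value.length := by
      simp [List.length_zip] at hk; omega
    have hx := h k hk'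
    rw [← hpk, List.getElem_zip, List.getElem_drop]
    simpa [show 1 + k = k + 1 by omega] using hx

lemma alt_some_iff (value : List Int) :
    filter_map_alt value = some true ↔
      Adj (fun a b => 1 ≤ b - a ∧ b - a ≤ 3) value ∨
      Adj (fun a b => -3 ≤ b - a ∧ b - a ≤ -1) value := by
  simp only [filter_map_alt]
  have hcond :
      ((((value.zip (value.drop 1)).map (fun p => p.2 - p.1)).all
          (fun d => decide (1 ≤ d) && decide (d ≤ 3)) ||
        ((value.zip (value.drop 1)).map (fun p => p.2 - p.1)).all
          (fun d => decide (-3 ≤ d) && decide (d ≤ -1))) = true) ↔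
      (Adj (fun a b => 1 ≤ b - a ∧ b - a ≤ 3) value ∨
       Adj (fun a b => -3 ≤ b - a ∧ b - a ≤ -1) value) := by
    simp only [Bool.or_eq_true, List.all_map, List.all_eq_true, Function.comp,
      Bool.and_eq_true, decide_eq_true_eq]
    exact or_congr (forall_zip_iff_adj value (fun d => 1 ≤ d ∧ d ≤ 3))
      (forall_zip_iff_adj value (fun d => -3 ≤ d ∧ d ≤ -1))
  split_ifs with h
  · exact iff_of_true rfl (hcond.1 h)
  · exact iff_of_false (by simp) (fun hc => h (hcond.2 hc))

-- pointwise arithmetic: A's abs-in-range(1,4) test against B's signed-interval tests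
lemma point_abs (a b : Int) :
    (1 ≤ |a - b| ∧ |a - b| < 4) ↔
      ((1 ≤ b - a ∧ b - a ≤ 3) ∨ (-3 ≤ b - a ∧ b - a ≤ -1)) := by
  rcases le_total a b with h | h
  · rw [abs_of_nonpos (by omega)]; omega
  · rw [abs_of_nonneg (by omega)]; omega

-- the pure logic connecting A's conditions with B's
lemma conditions_iff (value : List Int) :
    ((Adj (· ≤ ·) value ∨ Adj (fun a b => b ≤ a) value) ∧
      Adj (fun a b => 1 ≤ |a - b| ∧ |a - b| < 4) value) ↔
    (Adj (fun a b => 1 ≤ b - a ∧ b - a ≤ 3) value ∨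
      Adj (fun a b => -3 ≤ b - a ∧ b - a ≤ -1) value) := by
  constructor
  · rintro ⟨hmono | hmono, habs⟩
    · left; intro k hk
      have h1 : value[k]'(by omega) ≤ value[k+1]'hk := hmono k hk
      have h2 := (point_abs _ _).1 (habs k hk)
      omega
    · right; intro k hk
      have h1 : value[k+1]'hk ≤ value[k]'(by omega) := hmono k hk
      have h2 := (point_abs _ _).1 (habs k hk)
      omega
  · rintro (h | h)
    · refine ⟨Or.inl fun k hk => ?_, fun k hk => ?_⟩
      · have h1 := h k hk; show value[k]'(by omega) ≤ value[k+1]'hk; omega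
      · exact (point_abs _ _).2 (Or.inl (h k hk))
    · refine ⟨Or.inr fun k hk => ?_, fun k hk => ?_⟩
      · have h1 := h k hk; show value[k+1]'hk ≤ value[k]'(by omega); omega
      · exact (point_abs _ _).2 (Or.inr (h k hk))

lemma opt_bool_eq (o1 o2 : Option Bool)
    (h1 : o1 = some true ∨ o1 = none) (h2 : o2 = some true ∨ o2 = none)
    (h : o1 = some true ↔ o2 = some true) : o1 = o2 := by
  rcases h1 with h1 | h1 <;> rcases h2 with h2 | h2 <;> simp_all

-- ===== VERDICT (by name: the statement is the Claim_ definition above) =====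
theorem filter_map_spec : Claim_equal_filter_map := by
  intro value _
  unfold Spec_filter_map
  apply opt_bool_eq
  · simp only [filter_map]
    split_ifs with h
    · right; rfl
    · exact loop_none_or_true value _ _
  · simp only [filter_map_alt]
    split_ifs <;> simp
  · rw [alt_some_iff, ← conditions_iff]
    simp only [filter_map]
    split_ifs with h
    · constructor
      · intro hc; cases hc
      · rintro ⟨hmono, _⟩
        exfalso
        rcases hmono with hm | hm
        · exact h.1 ((sorted_asc_iff value).2 hm)
        · exact h.2 ((sorted_desc_iff value).2 hm)
    · rw [loop_range_iff]
      rw [not_and_or, not_not, not_not] at h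
      constructor
      · intro habs
        refine ⟨?_, habs⟩
        rcases h with hs | hs
        · exact Or.inl ((sorted_asc_iff value).1 hs)
        · exact Or.inr ((sorted_desc_iff value).1 hs)
      · rintro ⟨_, habs⟩; exact habs
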